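-- pv_equiv track=rewrite | github.com/SwimmingLee/ProblemSolving | (Pyton)ProblemSolving/ProblemSovling/세그먼트 트리/[BOJ_5419]북서풍.py | solution
-- ===== SOURCE A (Python) =====
-- def solution(island):
--     cnt = 0
--     for i in range(len(island)):
--         for j in range(len(island)):
--             if i == j:
--                 continue
--             if island[i][0] <= island[j][0] and island[i][1] >= island[j][1]:
--                 cnt += 1
--     return cnt
-- ===== SOURCE B (Python) =====
-- def solution(island):
--     if len(island) < 2:
--         return 0
--     freq = {}
--     for p in island:
--         k = (p[0], p[1])
--         freq[k] = freq.get(k, 0) + 1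
--     total = -len(island)
--     for (x1, y1), c1 in freq.items():
--         for (x2, y2), c2 in freq.items():
--             if (x1, y1) == (x2, y2):
--                 total += c1 * c1
--             elif x1 <= x2 and y1 >= y2:
--                 total += c1 * c2
--     return total
-- ===== Notes on version B (the rewrite author's own statement) =====
-- stated objective: alternative
-- what changed: B groups equal points once in a dict of multiplicities and counts ordered pairs over distinct point classes (c1*c2 per qualifying class pair, c*c within a class, minus n self-pairs), instead of A's double loop over all index pairs.
import Mathlib
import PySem

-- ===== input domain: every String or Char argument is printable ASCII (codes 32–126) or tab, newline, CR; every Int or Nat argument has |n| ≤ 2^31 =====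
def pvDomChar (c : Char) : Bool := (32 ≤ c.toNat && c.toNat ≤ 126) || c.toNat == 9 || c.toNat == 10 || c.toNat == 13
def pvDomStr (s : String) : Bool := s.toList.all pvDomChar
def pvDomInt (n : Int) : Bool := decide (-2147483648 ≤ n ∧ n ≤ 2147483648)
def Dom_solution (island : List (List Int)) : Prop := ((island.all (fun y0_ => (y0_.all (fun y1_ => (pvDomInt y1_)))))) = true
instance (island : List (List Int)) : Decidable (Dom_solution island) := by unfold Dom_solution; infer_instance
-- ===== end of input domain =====

-- B groups equal points once in a dict of multiplicities and counts ordered pairs over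
-- distinct point classes instead of A's double loop over all index pairs; same worst-case
-- cost, fewer iterations whenever points repeat ("alternative" objective).

-- ===== PORT A =====
def solution (island : List (List Int)) : Int :=
  (PySem.List.pyRange 0 island.length 1).foldl (fun cnt i =>
    (PySem.List.pyRange 0 island.length 1).foldl (fun cnt j =>
      if i == j then cnt
      else if PySem.List.pyGetD (PySem.List.pyGetD island i []) 0 0 ≤ PySem.List.pyGetD (PySem.List.pyGetD island j []) 0 0
              ∧ PySem.List.pyGetD (PySem.List.pyGetD island i []) 1 0 ≥ PySem.List.pyGetD (PySem.List.pyGetD island j []) 1 0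
           then cnt + 1 else cnt) cnt) 0

-- ===== PORT B =====
def solution_alt (island : List (List Int)) : Int :=
  if island.length < 2 then 0
  else
    let freq : PySem.Dict (Int × Int) Int := island.foldl (fun d p =>
      let k := (PySem.List.pyGetD p 0 0, PySem.List.pyGetD p 1 0)
      d.insert k (d.getD k 0 + 1)) PySem.Dict.empty
    freq.items.foldl (fun total e1 =>
      freq.items.foldl (fun total e2 =>
        if e1.1 == e2.1 then total + e1.2 * e1.2
        else if e1.1.1 ≤ e2.1.1 ∧ e1.1.2 ≥ e2.1.2 then total + e1.2 * e2.2
        else total) total) (-(island.length : Int))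

-- ===== PRECONDITION & SPEC =====
-- Pre_ excludes exactly the inputs on which Python A raises IndexError: with at least two
-- rows, some row shorter than 2 always gets indexed at [0] or [1] eventually.
def Pre_solution (island : List (List Int)) : Prop :=
  island.length < 2 ∨ ∀ row ∈ island, 2 ≤ row.length
instance (island : List (List Int)) : Decidable (Pre_solution island) := by unfold Pre_solution; infer_instance

def pvWitness_solution : List (List Int) := [[0, 1], [2, 3], [0, 1]]

def Spec_solution (island : List (List Int)) (out : Int) : Prop := out = solution_alt island
instance (island : List (List Int)) (out : Int) : Decidable (Spec_solution island out) := by unfold Spec_solution; infer_instance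

-- ===== CLAIM (what is proved, stated in full; the proofs are below) =====
def Claim_equal_solution : Prop := ∀ (island : List (List Int)), Dom_solution island → Pre_solution island → Spec_solution island (solution island)

-- ===== LEMMAS AND PROOFS =====

-- the point a row denotes, the 0/1 pair indicator, and the full (diagonal-included) pair sum
def pvKey (p : List Int) : Int × Int := (PySem.List.pyGetD p 0 0, PySem.List.pyGetD p 1 0)
def pvInd (a b : Int × Int) : Int := if a.1 ≤ b.1 ∧ a.2 ≥ b.2 then 1 else 0
def pvS (l : List (Int × Int)) : Int := (l.map (fun a => (l.map (fun b => pvInd a b)).sum)).sum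

theorem pv_diag (l : List Int) (u : Int → Int) (i : Int) (hnd : l.Nodup) (hi : i ∈ l) :
    (l.map (fun j => if i == j then 0 else u j)).sum = (l.map u).sum - u i := by
  induction l with
  | nil => cases hi
  | cons a t ih =>
    rcases List.nodup_cons.mp hnd with ⟨hna, hndt⟩
    rcases List.mem_cons.mp hi with rfl | hit
    · simp only [List.map_cons, List.sum_cons, beq_self_eq_true, if_true]
      have : (t.map (fun j => if i == j then 0 else u j)) = t.map u := by
        apply List.map_congr_left
        intro j hj
        have : i ≠ j := by rintro rfl; exact hna hj
        simp [this]
      rw [this]; ring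
    · have hia : (i == a) = false := by simp; rintro rfl; exact hna hit
      simp only [List.map_cons, List.sum_cons, hia, Bool.false_eq_true, if_false]
      rw [ih hndt hit]; ring

theorem pv_sum_count (h : (Int × Int) → Int) (D : List (Int × Int)) :
    ∀ (l : List (Int × Int)), D.Nodup → (∀ x, x ∈ D ↔ x ∈ l) →
    (D.map (fun k => (l.count k : Int) * h k)).sum = (l.map h).sum := by
  induction D with
  | nil =>
    intro l _ hm
    have : l = [] := by
      cases l with
      | nil => rfl
      | cons a t => exact absurd ((hm a).mpr (List.mem_cons_self)) (by simp)
    simp [this]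
  | cons k D' ih =>
    intro l hnd hm
    rcases List.nodup_cons.mp hnd with ⟨hkD, hndD⟩
    have hperm := List.filter_append_perm (fun x => x == k) l
    have hsum : (l.map h).sum = ((l.filter (fun x => x == k)).map h).sum
        + ((l.filter (fun x => !(x == k))).map h).sum := by
      rw [← List.sum_append, ← List.map_append]
      exact (List.Perm.sum_eq (List.Perm.map h hperm)).symm
    have hfk : (l.filter (fun x => x == k)).map h
        = List.replicate (l.count k) (h k) := by
      have hlen : ((l.filter (fun x => x == k)).map h).length = l.count k := by
        rw [List.count, List.length_map, List.countP_eq_length_filter]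
      rw [← hlen]
      apply List.eq_replicate_of_mem
      intro b hb
      rcases List.mem_map.mp hb with ⟨x, hx, rfl⟩
      have := List.of_mem_filter hx
      have : x = k := by simpa using this
      rw [this]
    have hcount' : ∀ x ∈ D', (l.filter (fun y => !(y == k))).count x = l.count x := by
      intro x hx
      have hxk : x ≠ k := by rintro rfl; exact hkD hx
      rw [List.count_filter (by simp [hxk])]
    have hmem' : ∀ x, x ∈ D' ↔ x ∈ l.filter (fun y => !(y == k)) := by
      intro x
      constructor
      · intro hx
        have hxl : x ∈ l := (hm x).mp (List.mem_cons_of_mem _ hx)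
        have hxk : x ≠ k := by rintro rfl; exact hkD hx
        apply List.mem_filter.mpr ⟨hxl, by simpa using hxk⟩
      · intro hx
        rcases List.mem_filter.mp hx with ⟨hxl, hxk⟩
        have hxk' : x ≠ k := by simpa using hxk
        rcases List.mem_cons.mp ((hm x).mpr hxl) with rfl | hxD
        · exact absurd rfl hxk'
        · exact hxD
    have hrec := ih (l.filter (fun y => !(y == k))) hndD hmem'
    have hD'map : D'.map (fun x => ((l.filter (fun y => !(y == k))).count x : Int) * h x)
        = D'.map (fun x => (l.count x : Int) * h x) := by
      apply List.map_congr_left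
      intro x hx
      rw [hcount' x hx]
    simp only [List.map_cons, List.sum_cons, hsum, hfk]
    rw [← hD'map, hrec]
    simp [List.sum_replicate, mul_comm]

theorem pvInd_refl (a : Int × Int) : pvInd a a = 1 := by simp [pvInd]

theorem pv_sum_map_sub (l : List Int) (f g : Int → Int) :
    (l.map (fun x => f x - g x)).sum = (l.map f).sum - (l.map g).sum := by
  induction l with
  | nil => simp
  | cons a t ih => simp only [List.map_cons, List.sum_cons, ih]; ring

theorem pv_A_eq (island : List (List Int)) :
    solution island = pvS (island.map pvKey) - island.length := by
  unfold solution
  have hK : ∀ (q : List Int) (j : Int),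
      pvKey (PySem.List.pyGetD island j []) = pvKey (PySem.List.pyGetD island j []) := fun _ _ => rfl
  -- rewrite both folds into sum form
  have hinner : ∀ (i cnt : Int),
      (PySem.List.pyRange 0 island.length 1).foldl (fun cnt j =>
        if i == j then cnt
        else if PySem.List.pyGetD (PySem.List.pyGetD island i []) 0 0 ≤ PySem.List.pyGetD (PySem.List.pyGetD island j []) 0 0
                ∧ PySem.List.pyGetD (PySem.List.pyGetD island i []) 1 0 ≥ PySem.List.pyGetD (PySem.List.pyGetD island j []) 1 0
             then cnt + 1 else cnt) cnt
      = cnt + ((PySem.List.pyRange 0 island.length 1).map (fun j =>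
          if i == j then 0 else pvInd (pvKey (PySem.List.pyGetD island i [])) (pvKey (PySem.List.pyGetD island j [])))).sum := by
    intro i cnt
    rw [PySem.List.foldl_congr_mem (g := fun cnt j =>
      cnt + (if i == j then 0 else pvInd (pvKey (PySem.List.pyGetD island i [])) (pvKey (PySem.List.pyGetD island j []))))]
    · exact PySem.List.foldl_add _ _ _
    · intro acc x _
      by_cases hij : i == x
      · simp [hij]
      · simp only [hij, Bool.false_eq_true, if_false, pvInd, pvKey]
        split_ifs <;> simp
  rw [PySem.List.foldl_congr_mem (g := fun cnt i =>
    cnt + ((PySem.List.pyRange 0 island.length 1).map (fun j =>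
      if i == j then 0 else pvInd (pvKey (PySem.List.pyGetD island i [])) (pvKey (PySem.List.pyGetD island j [])))).sum)]
  · rw [PySem.List.foldl_add]
    have hbase : (PySem.List.pyRange 0 island.length 1).map (fun j => PySem.List.pyGetD island j ([] : List Int)) = island :=
      PySem.List.map_pyGetD_pyRange_zero' island []
    have hRmap : ∀ f : (Int × Int) → Int,
        (PySem.List.pyRange 0 island.length 1).map (fun j => f (pvKey (PySem.List.pyGetD island j []))) = island.map (fun p => f (pvKey p)) := by
      intro f
      rw [show (fun j => f (pvKey (PySem.List.pyGetD island j ([] : List Int)))) = (fun p => f (pvKey p)) ∘ (fun j => PySem.List.pyGetD island j ([] : List Int)) from rfl,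
        ← List.map_map, hbase]
    have hdiag : (PySem.List.pyRange 0 island.length 1).map (fun i =>
        ((PySem.List.pyRange 0 island.length 1).map (fun j =>
          if i == j then 0 else pvInd (pvKey (PySem.List.pyGetD island i [])) (pvKey (PySem.List.pyGetD island j [])))).sum)
        = (PySem.List.pyRange 0 island.length 1).map (fun i =>
          (island.map (fun b => pvInd (pvKey (PySem.List.pyGetD island i [])) (pvKey b))).sum - 1) := by
      apply List.map_congr_left
      intro i hi
      rw [pv_diag _ _ _ (PySem.List.nodup_pyRange_one 0 island.length) hi, pvInd_refl,
        hRmap (fun k => pvInd (pvKey (PySem.List.pyGetD island i [])) k)]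
    rw [hdiag, pv_sum_map_sub, hRmap (fun k => (island.map (fun b => pvInd k (pvKey b))).sum)]
    have hconst : ((PySem.List.pyRange 0 island.length 1).map (fun _ => (1 : Int))).sum = island.length := by
      rw [List.map_const', List.sum_replicate, PySem.List.length_pyRange_one]
      simp
    rw [hconst]
    simp only [pvS, List.map_map, zero_add]
    rfl
  · intro acc x _
    exact hinner x acc

theorem pv_B_eq (island : List (List Int)) :
    solution_alt island = pvS (island.map pvKey) - island.length := by
  unfold solution_alt
  split
  · rename_i hlt
    match island, hlt with
    | [], _ => simp [pvS]
    | [p], _ => simp [pvS, pvInd_refl]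
  · rename_i hge
    have hfreq : island.foldl (fun d p =>
        let k := (PySem.List.pyGetD p 0 0, PySem.List.pyGetD p 1 0)
        d.insert k (d.getD k 0 + 1)) PySem.Dict.empty
        = PySem.Dict.counter (island.map pvKey) := by
      rw [← PySem.Dict.foldl_insert_getD_add_one_eq_counter, List.foldl_map]
      rfl
    rw [hfreq]
    simp only [PySem.Dict.items_counter]
    set pts := island.map pvKey with hpts
    set D := PySem.Set.ofList pts with hD
    set items := D.map (fun k => (k, (pts.count k : Int))) with hitems
    -- w is the loop body's contribution
    have hw : ∀ e1 ∈ items, ∀ e2 ∈ items, ∀ total : Int,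
        (if e1.1 == e2.1 then total + e1.2 * e1.2
         else if e1.1.1 ≤ e2.1.1 ∧ e1.1.2 ≥ e2.1.2 then total + e1.2 * e2.2
         else total)
        = total + e2.2 * (pvInd e1.1 e2.1 * e1.2) := by
      intro e1 he1 e2 he2 total
      rcases List.mem_map.mp he1 with ⟨k1, _, rfl⟩
      rcases List.mem_map.mp he2 with ⟨k2, _, rfl⟩
      simp only [pvInd]
      by_cases hk : k1 = k2
      · subst hk
        simp
      · have : (k1 == k2) = false := by simpa using hk
        simp only [this, Bool.false_eq_true, if_false]
        split_ifs <;> ring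
    have hinner : ∀ e1 ∈ items, ∀ total : Int,
        items.foldl (fun total e2 =>
          if e1.1 == e2.1 then total + e1.2 * e1.2
          else if e1.1.1 ≤ e2.1.1 ∧ e1.1.2 ≥ e2.1.2 then total + e1.2 * e2.2
          else total) total
        = total + (items.map (fun e2 => e2.2 * (pvInd e1.1 e2.1 * e1.2))).sum := by
      intro e1 he1 total
      rw [PySem.List.foldl_congr_mem (g := fun total e2 => total + e2.2 * (pvInd e1.1 e2.1 * e1.2))]
      · exact PySem.List.foldl_add _ _ _
      · intro acc x hx
        exact hw e1 he1 x hx acc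
    rw [PySem.List.foldl_congr_mem (g := fun total e1 =>
        total + (items.map (fun e2 => e2.2 * (pvInd e1.1 e2.1 * e1.2))).sum)]
    · rw [PySem.List.foldl_add]
      have hndD : D.Nodup := PySem.Set.nodup_ofList pts
      have hmD : ∀ x, x ∈ D ↔ x ∈ pts := fun x => PySem.Set.mem_ofList pts x
      have hin : ∀ k1 : Int × Int,
          (items.map (fun e2 => e2.2 * (pvInd k1 e2.1 * (pts.count k1 : Int)))).sum
          = ((pts.map (fun b => pvInd k1 b)).sum) * (pts.count k1 : Int) := by
        intro k1
        rw [hitems, List.map_map]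
        have := pv_sum_count (fun k2 => pvInd k1 k2 * (pts.count k1 : Int)) D pts hndD hmD
        rw [show ((fun e2 : (Int × Int) × Int => e2.2 * (pvInd k1 e2.1 * (pts.count k1 : Int)))
            ∘ (fun k => (k, (pts.count k : Int)))) = (fun k => (pts.count k : Int) * (pvInd k1 k * (pts.count k1 : Int))) from rfl, this]
        rw [← List.sum_map_mul_right]
      have houter : (items.map (fun e1 =>
          (items.map (fun e2 => e2.2 * (pvInd e1.1 e2.1 * e1.2))).sum)).sum = pvS pts := by
        rw [hitems, List.map_map]
        have hcongr : ((fun e1 : (Int × Int) × Int => (items.map (fun e2 => e2.2 * (pvInd e1.1 e2.1 * e1.2))).sum)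
            ∘ (fun k => (k, (pts.count k : Int))))
            = fun k1 => (pts.count k1 : Int) * ((pts.map (fun b => pvInd k1 b)).sum) := by
          funext k1
          simp only [Function.comp]
          rw [hin k1]
          ring
        rw [hcongr, pv_sum_count (fun k1 => (pts.map (fun b => pvInd k1 b)).sum) D pts hndD hmD]
        rfl
      rw [houter]
      have : pts.length = island.length := by simp [hpts]
      rw [hpts]
      ring
    · intro acc x hx
      exact hinner x hx acc

-- ===== VERDICT (by name: the statement is the Claim_ definition above) =====
theorem solution_spec : Claim_equal_solution := by
  intro island _ _
  unfold Spec_solution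
  rw [pv_A_eq, pv_B_eq]
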